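-- pv_equiv track=rewrite | github.com/KailebL/ComputerProgrammingUltimatePythonRepository | 06ListsAndLoops/Assignment/main.py | sum_with_skips
-- ===== SOURCE A (Python) =====
-- def sum_with_skips(integers):
--     ignore = False
--     sum = 0
--     for number in integers:
--         if number == -1 and ignore == False:
--             ignore = True
--         elif number == -1 and ignore == True:
--             ignore = False
--         elif ignore == False and number != -1:
--             sum = sum + number
--     return sum
-- ===== SOURCE B (Python) =====
-- def sum_with_skips(integers):
--     # Phase 1: split the input into groups delimited by -1 markers.
--     groups = []
--     current = []
--     for n in integers:
--         if n == -1: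
--             groups.append(current)
--             current = []
--         else:
--             current.append(n)
--     groups.append(current)
--     # Phase 2: sum only the even-indexed groups.
--     return _sum_even_groups(groups)
--
-- def _sum_even_groups(groups):
--     if not groups:
--         return 0
--     return sum(groups[0]) + _sum_even_groups(groups[2:])
-- ===== Notes on version B (the rewrite author's own statement) =====
-- stated objective: alternative
-- what changed: B replaces the stateful toggle-flag loop by a two-phase algorithm: first split the input into groups delimited by -1, then sum only the even-indexed groups.
import Mathlib
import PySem

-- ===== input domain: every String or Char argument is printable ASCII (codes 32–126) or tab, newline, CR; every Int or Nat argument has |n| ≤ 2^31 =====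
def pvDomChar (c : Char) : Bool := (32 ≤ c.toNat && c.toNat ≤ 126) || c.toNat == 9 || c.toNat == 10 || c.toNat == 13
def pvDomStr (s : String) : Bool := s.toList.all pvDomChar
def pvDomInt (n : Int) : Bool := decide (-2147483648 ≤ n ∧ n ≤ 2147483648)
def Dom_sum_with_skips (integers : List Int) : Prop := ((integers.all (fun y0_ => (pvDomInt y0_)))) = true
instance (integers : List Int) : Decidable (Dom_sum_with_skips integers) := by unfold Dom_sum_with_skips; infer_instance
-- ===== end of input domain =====

-- B replaces A's toggle-flag loop by a two-phase algorithm (split into -1-delimited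
-- groups, then sum the even-indexed groups); same O(n) cost, proved equal on Dom.


-- ===== PORT A =====
-- st = (ignore, sum); branches in A's order
def sum_with_skips (integers : List Int) : Int :=
  (integers.foldl (fun (st : Bool × Int) number =>
      if number = -1 ∧ st.1 = false then (true, st.2)
      else if number = -1 ∧ st.1 = true then (false, st.2)
      else if st.1 = false ∧ number ≠ -1 then (st.1, st.2 + number)
      else st)
    (false, 0)).2

-- ===== PORT B =====
-- phase 2 of Source B: _sum_even_groups (recursion on groups[2:])
def sumEvenGroups : List (List Int) → Int
  | [] => 0
  | [g] => g.sum
  | g :: _ :: rest => g.sum + sumEvenGroups rest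

-- phase 1 of Source B: the splitting loop with state (groups, current)
def sum_with_skips_alt (integers : List Int) : Int :=
  let st := integers.foldl
    (fun (st : List (List Int) × List Int) n =>
      if n = -1 then (st.1 ++ [st.2], []) else (st.1, st.2 ++ [n]))
    ([], [])
  sumEvenGroups (st.1 ++ [st.2])

-- ===== PRECONDITION & SPEC =====
def Spec_sum_with_skips (integers : List Int) (out : Int) : Prop := out = sum_with_skips_alt integers
instance (integers : List Int) (out : Int) : Decidable (Spec_sum_with_skips integers out) := by unfold Spec_sum_with_skips; infer_instance

-- ===== CLAIM (what is proved, stated in full; the proofs are below) =====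
def Claim_equal_sum_with_skips : Prop := ∀ (integers : List Int), Dom_sum_with_skips integers → Spec_sum_with_skips integers (sum_with_skips integers)

-- ===== LEMMAS AND PROOFS =====

-- reference alternating sum: the value A computes from flag state `ig`
def ae (ig : Bool) : List Int → Int
  | [] => 0
  | n :: l => if n = -1 then ae (!ig) l else (if ig then 0 else n) + ae ig l

-- functional splitter: groups of the rest of the list given current group `cur`
def splitG : List Int → List Int → List (List Int)
  | [], cur => [cur]
  | n :: l, cur => if n = -1 then cur :: splitG l [] else splitG l (cur ++ [n])

theorem sumEvenGroups_cons (g : List Int) (rest : List (List Int)) :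
    sumEvenGroups (g :: rest) = g.sum + sumEvenGroups (rest.drop 1) := by
  cases rest with
  | nil => simp [sumEvenGroups]
  | cons h t => simp [sumEvenGroups]

theorem foldA_eq (l : List Int) : ∀ (ig : Bool) (s : Int),
    (l.foldl (fun (st : Bool × Int) number =>
      if number = -1 ∧ st.1 = false then (true, st.2)
      else if number = -1 ∧ st.1 = true then (false, st.2)
      else if st.1 = false ∧ number ≠ -1 then (st.1, st.2 + number)
      else st) (ig, s)).2 = s + ae ig l := by
  induction l with
  | nil => intro ig s; simp [ae]
  | cons n l ih =>
    intro ig s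
    by_cases hn : n = -1 <;> cases ig <;>
      simp [List.foldl_cons, hn, ae, ih] <;> ring

theorem foldB_eq (l : List Int) : ∀ (gs : List (List Int)) (cur : List Int),
    (l.foldl (fun (st : List (List Int) × List Int) n =>
      if n = -1 then (st.1 ++ [st.2], []) else (st.1, st.2 ++ [n])) (gs, cur)).1
    ++ [(l.foldl (fun (st : List (List Int) × List Int) n =>
      if n = -1 then (st.1 ++ [st.2], []) else (st.1, st.2 ++ [n])) (gs, cur)).2]
    = gs ++ splitG l cur := by
  induction l with
  | nil => intro gs cur; simp [splitG]
  | cons n l ih =>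
    intro gs cur
    by_cases hn : n = -1 <;> simp [List.foldl_cons, hn, splitG, ih]

theorem split_ae (l : List Int) : ∀ (cur : List Int),
    sumEvenGroups (splitG l cur) = cur.sum + ae false l ∧
    sumEvenGroups ((splitG l cur).drop 1) = ae true l := by
  induction l with
  | nil => intro cur; simp [splitG, sumEvenGroups, ae]
  | cons n l ih =>
    intro cur
    by_cases hn : n = -1
    · constructor
      · subst hn
        rw [show splitG (-1 :: l) cur = cur :: splitG l [] from by simp [splitG]]
        rw [sumEvenGroups_cons, (ih []).2]
        simp [ae]
      · simpa [splitG, hn, ae] using (ih []).1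
    · constructor
      · have := (ih (cur ++ [n])).1
        simp [splitG, hn, ae] at this ⊢
        rw [this]; ring
      · simpa [splitG, hn, ae] using (ih (cur ++ [n])).2

-- ===== VERDICT (by name: the statement is the Claim_ definition above) =====
theorem sum_with_skips_spec : Claim_equal_sum_with_skips := by
  intro integers _
  show sum_with_skips integers = sum_with_skips_alt integers
  rw [sum_with_skips, sum_with_skips_alt]
  rw [foldA_eq, foldB_eq]
  simpa using ((split_ae integers []).1).symm
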